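-- pv_equiv track=rewrite | github.com/0x00Duke/MATH | 108trigo/src/get/get_basic_mat.py | basic_mat
-- ===== SOURCE A (Python) =====
-- def basic_mat(matrice):
--     basic = []
--     n = 0
--     for y in range(len(matrice)):
--         basic.append([])
--         for x in range(len(matrice[y])):
--             if x == n:
--                 basic[y].append(1)
--             else:
--                 basic[y].append(0)
--         n += 1
--     return basic
-- ===== SOURCE B (Python) =====
-- def basic_mat(matrice):
--     return [([0] * y + [1] + [0] * len(row))[:len(row)]
--             for y, row in enumerate(matrice)]
-- ===== Notes on version B (the rewrite author's own statement) =====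
-- stated objective: simpler
-- what changed: Replaces A's nested index loops with explicit counter and per-cell branch by a one-line comprehension that builds each identity row in closed form as ([0]*y + [1] + [0]*len(row))[:len(row)] over enumerate.
import Mathlib
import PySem

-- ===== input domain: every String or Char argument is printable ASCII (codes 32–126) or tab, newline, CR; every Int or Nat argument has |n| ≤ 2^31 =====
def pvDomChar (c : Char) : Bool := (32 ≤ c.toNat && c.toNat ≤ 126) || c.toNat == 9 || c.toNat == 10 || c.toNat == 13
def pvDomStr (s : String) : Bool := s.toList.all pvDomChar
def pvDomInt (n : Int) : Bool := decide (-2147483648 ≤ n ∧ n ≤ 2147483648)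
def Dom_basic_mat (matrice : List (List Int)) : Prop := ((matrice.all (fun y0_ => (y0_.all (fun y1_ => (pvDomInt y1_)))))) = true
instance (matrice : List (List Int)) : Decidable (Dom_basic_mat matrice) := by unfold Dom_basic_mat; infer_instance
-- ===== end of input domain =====

-- B builds each identity row in closed form ([0]*y + [1] + [0]*len(row))[:len(row)] instead of
-- A's nested index loops with a counter and a per-cell branch; same cost, simpler structure.

-- ===== PORT A =====
-- for y in range(len(matrice)): basic.append([]); for x in range(len(matrice[y])): append 1/0; n += 1
-- basic[y] is always the row appended at the start of the iteration, so it is modelled as the row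
-- under construction, appended to basic at the end of the iteration (exact).
def basic_mat (matrice : List (List Int)) : List (List Int) :=
  (PySem.List.pyRange 0 (matrice.length : Int) 1).foldl
    (fun (st : List (List Int) × Int) y =>
      let row := (PySem.List.pyRange 0 ((PySem.List.pyGetD matrice y []).length : Int) 1).foldl
        (fun r x => if x == st.2 then r ++ [(1 : Int)] else r ++ [(0 : Int)]) []
      (st.1 ++ [row], st.2 + 1))
    ([], 0) |>.1

-- ===== PORT B =====
-- [([0]*y + [1] + [0]*len(row))[:len(row)] for y, row in enumerate(matrice)]
def basic_mat_alt (matrice : List (List Int)) : List (List Int) :=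
  (PySem.List.enumerate matrice).map (fun p =>
    PySem.List.slice (List.replicate p.1.toNat (0 : Int) ++ [(1 : Int)] ++ List.replicate p.2.length (0 : Int))
      none (some (p.2.length : Int)))

-- ===== PRECONDITION & SPEC =====
def Spec_basic_mat (matrice : List (List Int)) (out : List (List Int)) : Prop := out = basic_mat_alt matrice
instance (matrice : List (List Int)) (out : List (List Int)) : Decidable (Spec_basic_mat matrice out) := by unfold Spec_basic_mat; infer_instance

-- ===== CLAIM (what is proved, stated in full; the proofs are below) =====
def Claim_equal_basic_mat : Prop := ∀ (matrice : List (List Int)), Dom_basic_mat matrice → Spec_basic_mat matrice (basic_mat matrice)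

-- ===== LEMMAS AND PROOFS =====

-- A's inner loop builds the identity row for diagonal position n.
theorem pv_inner_row (n : Int) (L : Nat) :
    (PySem.List.pyRange 0 (L : Int) 1).foldl
      (fun r x => if x == n then r ++ [(1 : Int)] else r ++ [(0 : Int)]) []
    = (PySem.List.pyRange 0 (L : Int) 1).map (fun x => if x == n then (1 : Int) else 0) := by
  have h : ∀ (l : List Int) (acc : List Int),
      l.foldl (fun r x => if x == n then r ++ [(1 : Int)] else r ++ [(0 : Int)]) acc
      = acc ++ l.map (fun x => if x == n then (1 : Int) else 0) := by
    intro l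
    induction l with
    | nil => simp
    | cons a t ih =>
      intro acc
      by_cases ha : a == n <;> simp_all
  simpa using h _ []

-- A's outer loop, generalized: counter and loop index stay in lockstep.
theorem pv_outer (k : Nat) :
    ∀ (a : Int) (b : List (List Int)) (rowFor : Int → Int → List Int),
    (PySem.List.pyRange a (a + k) 1).foldl
      (fun (st : List (List Int) × Int) y => (st.1 ++ [rowFor y st.2], st.2 + 1)) (b, a)
    = (b ++ (PySem.List.pyRange a (a + k) 1).map (fun y => rowFor y y), a + k) := by
  induction k with
  | zero => intro a b rowFor; simp [PySem.List.pyRange_one_eq_nil]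
  | succ k ih =>
    intro a b rowFor
    have hlt : a < a + ((k : Int) + 1) := by omega
    rw [show ((a : Int) + ((k : Nat) + 1 : Nat)) = a + ((k : Int) + 1) by push_cast; ring,
        PySem.List.pyRange_one_cons hlt]
    simp only [List.foldl_cons, List.map_cons]
    have := ih (a + 1) (b ++ [rowFor a a]) rowFor
    rw [show a + 1 + (k : Int) = a + ((k : Int) + 1) by ring] at this
    rw [this]
    simp

-- the padded row, indexed: 1 on the diagonal, 0 elsewhere
theorem pv_pad_get (m L i : Nat)
    (h : i < (List.replicate m (0 : Int) ++ [(1 : Int)] ++ List.replicate L (0 : Int)).length) :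
    (List.replicate m (0 : Int) ++ [(1 : Int)] ++ List.replicate L (0 : Int))[i]
      = if i = m then (1 : Int) else 0 := by
  induction m generalizing i with
  | zero => cases i <;> simp
  | succ m ih =>
    cases i with
    | zero => simp
    | succ i =>
      simp only [List.replicate_succ, List.cons_append, List.getElem_cons_succ] at *
      rw [ih]
      simp

-- the closed-form row equals A's per-cell row, for a nonnegative diagonal index
theorem pv_row_eq (m L : Nat) :
    (PySem.List.pyRange 0 (L : Int) 1).map (fun x => if x == (m : Int) then (1 : Int) else 0)
    = (List.replicate m (0 : Int) ++ [(1 : Int)] ++ List.replicate L (0 : Int)).take L := by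
  rw [PySem.List.pyRange_one]
  simp only [Int.sub_zero, Int.toNat_natCast, List.map_map]
  apply List.ext_getElem
  · simp; omega
  · intro i h1 h2
    simp only [List.length_map, List.length_range] at h1
    simp only [List.getElem_map, List.getElem_range, Function.comp_apply, List.getElem_take,
      pv_pad_get]
    have hbe : ((0 : Int) + (i : Int) == (m : Int)) = decide (i = m) := by
      by_cases him : i = m <;> simp [him]
    rw [hbe]
    simp

-- ===== VERDICT (by name: the statement is the Claim_ definition above) =====
theorem basic_mat_spec : Claim_equal_basic_mat := by
  intro matrice _
  unfold Spec_basic_mat basic_mat basic_mat_alt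
  rw [PySem.List.enumerate_eq_map_pyRange (d := [])]
  have hb : (List.foldl
      (fun (st : List (List Int) × Int) y =>
        let row := (PySem.List.pyRange 0 ((PySem.List.pyGetD matrice y []).length : Int) 1).foldl
          (fun r x => if x == st.2 then r ++ [(1 : Int)] else r ++ [(0 : Int)]) []
        (st.1 ++ [row], st.2 + 1))
      ([], 0) (PySem.List.pyRange 0 (matrice.length : Int) 1))
    = (List.foldl
      (fun (st : List (List Int) × Int) y =>
        (st.1 ++ [(fun (y n : Int) =>
            (PySem.List.pyRange 0 ((PySem.List.pyGetD matrice y []).length : Int) 1).foldl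
              (fun r x => if x == n then r ++ [(1 : Int)] else r ++ [(0 : Int)]) []) y st.2],
         st.2 + 1))
      ([], 0) (PySem.List.pyRange 0 (matrice.length : Int) 1)) := rfl
  have h := pv_outer matrice.length 0 []
    (fun (y n : Int) =>
      (PySem.List.pyRange 0 ((PySem.List.pyGetD matrice y []).length : Int) 1).foldl
        (fun r x => if x == n then r ++ [(1 : Int)] else r ++ [(0 : Int)]) [])
  rw [zero_add] at h
  simp only [PySem.List.len_eq]
  rw [hb, h]
  simp only [List.nil_append, List.map_map]
  apply List.map_congr_left
  intro y hy
  have hy0 : 0 ≤ y := (PySem.List.mem_pyRange_one.mp hy).1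
  simp only [Function.comp_apply]
  rw [pv_inner_row, show y = ((y.toNat : Nat) : Int) by omega, pv_row_eq,
      PySem.List.slice_to_natCast]
  have hmax : max y 0 = y := by omega
  simp [hmax]
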